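-- pv_equiv track=rewrite | github.com/SergPronin/hybrid-bci-p300-ssvep | tests/test_log_replay.py | _parse_run_blocks
-- ===== SOURCE A (Python) =====
-- from typing import Any, Dict, List, Optional, Tuple
--
-- def _parse_run_blocks(events: List[dict]) -> List[List[dict]]:
--     """Split event list into per-run blocks (by run_start … run_end)."""
--     runs: List[List[dict]] = []
--     current: List[dict] = []
--     for e in events:
--         if e.get("event") == "run_start":
--             current = [e]
--         elif current:
--             current.append(e)
--             if e.get("event") == "run_end":
--                 runs.append(current)
--                 current = []
--     if current:
--         runs.append(current)
--     return runs
-- ===== SOURCE B (Python) =====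
-- def _parse_run_blocks(events):
--     """Split event list into per-run blocks (by run_start ... run_end)."""
--     runs = []
--     n = len(events)
--     i = 0
--     while i < n:
--         # skip mode: advance until a run_start opens a block
--         if events[i].get("event") != "run_start":
--             i += 1
--             continue
--         block = [events[i]]
--         i += 1
--         # collect mode: gather the open block
--         while True:
--             if i == n:
--                 # an unterminated block at the end of the log is kept
--                 runs.append(block)
--                 return runs
--             e = events[i]
--             i += 1
--             kind = e.get("event")
--             if kind == "run_start":
--                 block = [e]          # a new start discards the open block
--             elif kind == "run_end":
--                 block.append(e)
--                 runs.append(block)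
--                 break                # back to skip mode
--             else:
--                 block.append(e)
--     return runs
-- ===== Notes on version B (the rewrite author's own statement) =====
-- stated objective: alternative
-- what changed: Replaces A's single fold carrying a (runs, current) accumulator with an emptiness test by explicit two-mode control flow: an outer skip loop that advances to the next run_start and an inner collect loop that gathers the open block until run_end or the end of the log.
import Mathlib
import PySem

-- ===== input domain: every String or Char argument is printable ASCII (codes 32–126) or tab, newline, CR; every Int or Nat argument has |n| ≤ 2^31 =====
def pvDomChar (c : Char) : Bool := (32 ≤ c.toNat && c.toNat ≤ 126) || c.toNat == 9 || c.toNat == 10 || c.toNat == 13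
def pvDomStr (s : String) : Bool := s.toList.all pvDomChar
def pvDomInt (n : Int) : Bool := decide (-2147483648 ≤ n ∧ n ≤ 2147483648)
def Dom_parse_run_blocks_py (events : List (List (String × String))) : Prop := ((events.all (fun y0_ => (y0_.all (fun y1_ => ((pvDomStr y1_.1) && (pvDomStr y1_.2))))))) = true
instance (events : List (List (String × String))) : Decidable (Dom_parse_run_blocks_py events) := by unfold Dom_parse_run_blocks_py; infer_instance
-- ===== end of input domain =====

-- B replaces A's single fold with a (runs, current) accumulator by an explicit two-mode
-- skip/collect control flow (objective: alternative decomposition; return value only, no mutation).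

-- e.get("event") — first-match lookup on the association list (Python dict semantics)
def pvGetEvent (e : List (String × String)) : Option String :=
  (PySem.Dict.mk e).get? "event"

-- ===== PORT A =====
-- A's loop body: state = (runs, current)
def pvStepA (st : List (List (List (String × String))) × List (List (String × String)))
    (e : List (String × String)) :
    List (List (List (String × String))) × List (List (String × String)) :=
  if pvGetEvent e = some "run_start" then (st.1, [e])
  else if st.2 ≠ [] then
    let cur := st.2 ++ [e]
    if pvGetEvent e = some "run_end" then (st.1 ++ [cur], []) else (st.1, cur)
  else st

def parse_run_blocks_py (events : List (List (String × String))) : List (List (List (String × String))) :=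
  let st := events.foldl pvStepA ([], [])
  if st.2 ≠ [] then st.1 ++ [st.2] else st.1

-- ===== PORT B =====
-- skip mode (outer loop of Source B) / collect mode (inner loop of Source B)
mutual
def pvScan : List (List (String × String)) → List (List (List (String × String)))
  | [] => []
  | e :: rest =>
    if pvGetEvent e = some "run_start" then pvCollect [e] rest else pvScan rest

def pvCollect (block : List (List (String × String))) :
    List (List (String × String)) → List (List (List (String × String)))
  | [] => [block]
  | e :: rest =>
    if pvGetEvent e = some "run_start" then pvCollect [e] rest
    else if pvGetEvent e = some "run_end" then (block ++ [e]) :: pvScan rest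
    else pvCollect (block ++ [e]) rest
end

def parse_run_blocks_py_alt (events : List (List (String × String))) : List (List (List (String × String))) :=
  pvScan events

-- ===== PRECONDITION & SPEC =====
def Spec_parse_run_blocks_py (events : List (List (String × String))) (out : List (List (List (String × String)))) : Prop := out = parse_run_blocks_py_alt events
instance (events : List (List (String × String))) (out : List (List (List (String × String)))) : Decidable (Spec_parse_run_blocks_py events out) := by unfold Spec_parse_run_blocks_py; infer_instance

-- ===== CLAIM (what is proved, stated in full; the proofs are below) =====
def Claim_equal_parse_run_blocks_py : Prop := ∀ (events : List (List (String × String))), Dom_parse_run_blocks_py events → Spec_parse_run_blocks_py events (parse_run_blocks_py events)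

-- ===== LEMMAS AND PROOFS =====

-- invariant: finishing A's fold from state (runs, cur) yields runs followed by what
-- B produces from the matching mode (skip when cur is empty, collect cur otherwise)
theorem pv_main (xs : List (List (String × String))) :
    ∀ (runs : List (List (List (String × String)))) (cur : List (List (String × String))),
    (let st := xs.foldl pvStepA (runs, cur)
     if st.2 ≠ [] then st.1 ++ [st.2] else st.1)
    = runs ++ (if cur = [] then pvScan xs else pvCollect cur xs) := by
  induction xs with
  | nil =>
    intro runs cur
    by_cases h : cur = [] <;> simp [h, pvScan, pvCollect]
  | cons e rest ih =>
    intro runs cur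
    simp only [List.foldl_cons]
    by_cases hs : pvGetEvent e = some "run_start"
    · have h1 := ih runs [e]
      by_cases h : cur = [] <;>
        simp_all [pvStepA, pvScan, pvCollect]
    · by_cases h : cur = []
      · have h1 := ih runs []
        simp_all [pvStepA, pvScan]
      · by_cases he : pvGetEvent e = some "run_end"
        · have h1 := ih (runs ++ [cur ++ [e]]) []
          simp_all [pvStepA, pvCollect]
        · have h1 := ih runs (cur ++ [e])
          simp_all [pvStepA, pvCollect]

-- ===== VERDICT (by name: the statement is the Claim_ definition above) =====
theorem parse_run_blocks_py_spec : Claim_equal_parse_run_blocks_py := by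
  intro events _
  unfold Spec_parse_run_blocks_py parse_run_blocks_py parse_run_blocks_py_alt
  simpa using pv_main events [] []
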